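-- pv_equiv track=rewrite | github.com/Jihyeok11/Algorithm | Python/Programmers/2020_KAKAO_BLIND_RECRUITMENT_문자열_압축.py | lenString
-- ===== SOURCE A (Python) =====
-- def lenString(brick,s):
--     my_string = {}
--     brick += 1
--     Answer = ''
--
--     List = []
--     for i in range(0,len(s),brick):
--         A = s[i:i+brick]
--         List.append(A)
--     # ['a','a','b','b','a','c','c','c']
--     for i in range(len(List)):
--         A = List[i]
--         cnt = 1
--         start = i
--         while start+1<len(List) and A == List[start+1]:
--             start += 1
--             cnt += 1
--             List[start] = 0
--
--         if List[i] and cnt != 1: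
--             Answer += str(cnt)+A
--         elif List[i]:
--             Answer += A
--
--
--     return len(Answer)
-- ===== SOURCE B (Python) =====
-- def lenString(brick, s):
--     size = brick + 1
--     blocks = [s[i:i + size] for i in range(0, len(s), size)]
--     total = 0
--     cur = None
--     cnt = 0
--     for blk in blocks:
--         if blk == cur:
--             cnt += 1
--         else:
--             if cur is not None:
--                 total += (len(str(cnt)) if cnt > 1 else 0) + len(cur)
--             cur, cnt = blk, 1
--     if cur is not None:
--         total += (len(str(cnt)) if cnt > 1 else 0) + len(cur)
--     return total
-- ===== Notes on version B (the rewrite author's own statement) =====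
-- stated objective: simpler
-- what changed: B replaces A's mark-duplicates-as-0 full-index scan with inner while loops and string concatenation by a single forward pass over the blocks that tracks the current block and its run count and accumulates the answer length as an integer directly.
import Mathlib
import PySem

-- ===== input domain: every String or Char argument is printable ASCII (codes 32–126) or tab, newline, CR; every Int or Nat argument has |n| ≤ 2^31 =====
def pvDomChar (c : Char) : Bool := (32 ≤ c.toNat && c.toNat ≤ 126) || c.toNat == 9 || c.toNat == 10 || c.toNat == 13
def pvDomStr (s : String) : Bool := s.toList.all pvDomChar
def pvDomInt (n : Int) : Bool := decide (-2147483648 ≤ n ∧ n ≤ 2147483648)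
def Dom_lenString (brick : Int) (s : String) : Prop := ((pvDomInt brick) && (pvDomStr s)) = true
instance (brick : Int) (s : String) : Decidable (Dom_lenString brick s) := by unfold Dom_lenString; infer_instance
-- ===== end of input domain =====

-- B replaces A's mark-duplicates-as-0 scan and string building with a single run-length pass
-- accumulating an integer total (objective: simpler).

-- ===== PORT A =====
-- A's List holds strings and, after marking, the int 0: modelled as Option String (none = 0).
def pvTruthy : Option String → Bool
  | some a => !a.toList.isEmpty
  | none => false

def pvStrO : Option String → List Char
  | some a => a.toList
  | none => []

-- the inner while loop: 'while start+1<len(List) and A == List[start+1]: start+=1; cnt+=1;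
-- List[start]=0'.  fuel only makes the recursion structural; with fuel = len(List) the guard
-- start+1 < len(List) always stops the loop first, so the 0 branch is never the stopping reason.
def pvMark (fuel : Nat) (A : Option String) (L : List (Option String)) (start : Nat) (cnt : Int) :
    List (Option String) × Nat × Int :=
  match fuel with
  | 0 => (L, start, cnt)
  | fuel + 1 =>
    if h : start + 1 < L.length then
      if L[start + 1] = A then
        pvMark fuel A (L.set (start + 1) none) (start + 1) (cnt + 1)
      else (L, start, cnt)
    else (L, start, cnt)

-- the outer 'for i in range(len(List))' loop, building Answer (a Python str, as List Char);
-- fuel = len(List) is exactly the number of iterations.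
def pvOuter (fuel : Nat) (L : List (Option String)) (i : Nat) (ans : List Char) : List Char :=
  match fuel with
  | 0 => ans
  | fuel + 1 =>
    if h : i < L.length then
      let A := L[i]
      let r := pvMark L.length A L i 1
      let ans' :=
        if pvTruthy (r.1.getD i none) && decide (r.2.2 ≠ 1) then
          ans ++ (PySem.Int.toStr r.2.2).toList ++ pvStrO A
        else if pvTruthy (r.1.getD i none) then ans ++ pvStrO A
        else ans
      pvOuter fuel r.1 (i + 1) ans'
    else ans

def lenString (brick : Int) (s : String) : Int :=
  -- my_string = {} is unused; brick += 1
  let brick' := brick + 1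
  let blocks :=
    (PySem.List.pyRange 0 (PySem.Str.len s) brick').map
      (fun i => PySem.Str.slice s (some i) (some (i + brick')))
  ((pvOuter blocks.length (blocks.map some) 0 []).length : Int)

-- ===== PORT B =====
-- contribution of a finished run: (len(str(cnt)) if cnt > 1 else 0) + len(cur)
def pvContrib (c : String) (cnt : Int) : Int :=
  (if 1 < cnt then PySem.Str.len (PySem.Int.toStr cnt) else 0) + PySem.Str.len c

def pvStep (st : Int × Option String × Int) (blk : String) : Int × Option String × Int :=
  if st.2.1 = some blk then (st.1, st.2.1, st.2.2 + 1)
  else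
    match st.2.1 with
    | none => (st.1, some blk, 1)
    | some c => (st.1 + pvContrib c st.2.2, some blk, 1)

def lenString_alt (brick : Int) (s : String) : Int :=
  let size := brick + 1
  let blocks :=
    (PySem.List.pyRange 0 (PySem.Str.len s) size).map
      (fun i => PySem.Str.slice s (some i) (some (i + size)))
  let r := blocks.foldl pvStep (0, none, 0)
  match r.2.1 with
  | none => r.1
  | some c => r.1 + pvContrib c r.2.2

-- ===== PRECONDITION & SPEC =====
-- Pre_ excludes brick = -1, where Python's range(0, len(s), 0) raises ValueError (in both A and B).
def Pre_lenString (brick : Int) (s : String) : Prop := brick ≠ -1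
instance (brick : Int) (s : String) : Decidable (Pre_lenString brick s) := by
  unfold Pre_lenString; infer_instance

def pvWitness_lenString : Int × String := (1, "aabbaccc")

def Spec_lenString (brick : Int) (s : String) (out : Int) : Prop := out = lenString_alt brick s
instance (brick : Int) (s : String) (out : Int) : Decidable (Spec_lenString brick s out) := by
  unfold Spec_lenString; infer_instance

-- ===== CLAIM (what is proved, stated in full; the proofs are below) =====
def Claim_equal_lenString : Prop := ∀ (brick : Int) (s : String),
  Dom_lenString brick s → Pre_lenString brick s → Spec_lenString brick s (lenString brick s)

-- ===== LEMMAS AND PROOFS =====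

-- the common run-length specification of both programs on the block list
def pvRuns (l : List String) : Int :=
  match l with
  | [] => 0
  | a :: xs =>
      pvContrib a (1 + (xs.takeWhile (· == a)).length) + pvRuns (xs.dropWhile (· == a))
termination_by l.length
decreasing_by
  have := (List.dropWhile_sublist (l := xs) (· == a)).length_le
  simp only [List.length_cons]; omega

theorem pvRuns_nil : pvRuns [] = 0 := by rw [pvRuns]

theorem pvRuns_cons (a : String) (xs : List String) :
    pvRuns (a :: xs) = pvContrib a (1 + (xs.takeWhile (· == a)).length)
      + pvRuns (xs.dropWhile (· == a)) := by rw [pvRuns]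

theorem pvSet_self (l : List α) (i : Nat) (v : α) (h : i < l.length) (hv : l[i] = v) :
    l.set i v = l := by
  apply List.ext_getElem (by simp)
  intro n h1 h2
  rw [List.getElem_set]
  split
  next he => subst he; exact hv.symm
  · rfl

-- marking an already-0 slot does not change the list
theorem pvMark_none_fst (fuel : Nat) :
    ∀ (L : List (Option String)) (start : Nat) (cnt : Int),
    (pvMark fuel none L start cnt).1 = L := by
  induction fuel with
  | zero => intro L start cnt; rfl
  | succ fuel ih =>
    intro L start cnt
    rw [pvMark]
    by_cases h : start + 1 < L.length
    · rw [dif_pos h]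
      split
      next heq =>
        rw [pvSet_self L (start + 1) none h heq]
        exact ih L (start + 1) (cnt + 1)
      · rfl
    · rw [dif_neg h]

-- the while loop over a run: marks the duplicates, counts them
theorem pvMark_run (rs : List String) :
    ∀ (fuel : Nat) (Q : List (Option String)) (a : String) (start : Nat) (cnt : Int),
    start + 1 = Q.length → rs.length ≤ fuel →
    pvMark fuel (some a) (Q ++ rs.map some) start cnt =
      (Q ++ (rs.takeWhile (· == a)).map (fun _ => (none : Option String))
         ++ (rs.dropWhile (· == a)).map some,
       start + (rs.takeWhile (· == a)).length,
       cnt + (rs.takeWhile (· == a)).length) := by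
  induction rs with
  | nil =>
    intro fuel Q a start cnt hQ _
    match fuel with
    | 0 => simp [pvMark]
    | fuel + 1 =>
      rw [pvMark, dif_neg (by simp; omega)]
      simp
  | cons x xs ih =>
    intro fuel Q a start cnt hQ hfuel
    match fuel with
    | 0 => simp at hfuel
    | fuel + 1 =>
      have hget : (Q ++ (x :: xs).map some)[start + 1]'(by simp; omega) = some x :=
        List.getElem_of_append (l₁ := Q) (l₂ := xs.map some) (by simp) hQ.symm
      rw [pvMark, dif_pos (by simp; omega)]
      split
      next heq =>
        have hx : x = a := by rw [hget] at heq; exact Option.some.inj heq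
        subst hx
        have hset : (Q ++ (x :: xs).map some).set (start + 1) none
            = (Q ++ [none]) ++ xs.map some := by
          simp only [List.map_cons]
          rw [hQ, List.set_append_right _ _ (Nat.le_refl _)]
          simp
        rw [hset, ih fuel (Q ++ [none]) x (start + 1) (cnt + 1) (by simp; omega)
          (by simp at hfuel ⊢; omega)]
        simp only [List.takeWhile_cons, List.dropWhile_cons, beq_self_eq_true, if_pos,
          List.map_cons, List.length_cons]
        rw [Prod.mk.injEq, Prod.mk.injEq]
        refine ⟨by simp, by omega, by push_cast; ring⟩
      next hne =>
        have hx : ¬ (x == a) = true := by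
          intro hc
          exact hne (by rw [hget, (beq_iff_eq).mp hc])
        simp only [List.takeWhile_cons, List.dropWhile_cons, hx, if_neg, Bool.false_eq_true,
          not_false_eq_true, List.map_nil, List.length_nil]
        simp

-- iterations whose slot was marked 0 change nothing
theorem pvOuter_skip (m : Nat) :
    ∀ (f : Nat) (Q post : List (Option String)) (ans : List Char),
    pvOuter (m + f) (Q ++ List.replicate m none ++ post) Q.length ans =
      pvOuter f (Q ++ List.replicate m none ++ post) (Q.length + m) ans := by
  induction m with
  | zero => intro f Q post ans; simp
  | succ m ih =>
    intro f Q post ans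
    have heq : Q ++ List.replicate (m + 1) (none : Option String) ++ post
        = Q ++ none :: (List.replicate m none ++ post) := by
      simp [List.replicate_succ]
    have hget : (Q ++ List.replicate (m + 1) (none : Option String) ++ post)[Q.length]'(by simp)
        = none :=
      List.getElem_of_append (l₁ := Q) (l₂ := List.replicate m none ++ post) heq rfl
    have hgetD : (Q ++ List.replicate (m + 1) (none : Option String) ++ post).getD Q.length none
        = none := by
      unfold List.getD
      rw [heq, List.getElem?_append_right (Nat.le_refl _)]
      simp
    have hfe : m + 1 + f = (m + f) + 1 := by omega
    rw [hfe, pvOuter, dif_pos (by simp)]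
    simp only [hget, pvMark_none_fst, hgetD, pvTruthy, Bool.false_and, Bool.false_eq_true,
      if_false]
    have hsplit : Q ++ List.replicate (m + 1) (none : Option String) ++ post
        = (Q ++ [none]) ++ List.replicate m none ++ post := by
      simp [List.replicate_succ, List.append_assoc]
    rw [hsplit]
    have h2 := ih f (Q ++ [none]) post ans
    simp only [List.length_append, List.length_cons, List.length_nil] at h2
    have e1 : Q.length + 1 = Q.length + (1 + 0) := by omega
    have e2 : Q.length + (1 + 0) + m = Q.length + (m + 1) := by omega
    rw [e1] at h2 ⊢
    rw [e2] at h2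
    exact h2

-- the outer loop over the unprocessed suffix computes the run-length total
theorem pvOuter_main (n : Nat) :
    ∀ (rest : List String) (Q : List (Option String)) (ans : List Char) (fuel : Nat),
    rest.length ≤ n → rest.length ≤ fuel →
    (∀ b ∈ rest, b.toList ≠ []) →
    ((pvOuter fuel (Q ++ rest.map some) Q.length ans).length : Int)
      = (ans.length : Int) + pvRuns rest := by
  induction n with
  | zero =>
    intro rest Q ans fuel hlen _ _
    have h0 : rest = [] := List.eq_nil_of_length_eq_zero (by omega)
    subst h0
    match fuel with
    | 0 => simp [pvRuns_nil, pvOuter]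
    | fuel + 1 =>
      rw [pvOuter, dif_neg (by simp)]
      simp [pvRuns_nil]
  | succ n ih =>
    intro rest Q ans fuel hlen hfuel hne
    match rest with
    | [] =>
      match fuel with
      | 0 => simp [pvRuns_nil, pvOuter]
      | fuel + 1 =>
        rw [pvOuter, dif_neg (by simp)]
        simp [pvRuns_nil]
    | r :: rs =>
      match fuel with
      | 0 => simp at hfuel
      | fu + 1 =>
        have hr : r.toList ≠ [] := hne r (by simp)
        rw [pvOuter, dif_pos (by simp)]
        have hget : (Q ++ ((r :: rs).map some))[Q.length]'(by simp) = some r :=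
          List.getElem_of_append (l₁ := Q) (l₂ := rs.map some) (by simp) rfl
        simp only [hget]
        have hsplit : Q ++ (r :: rs).map some = (Q ++ [some r]) ++ rs.map some := by simp
        rw [hsplit, pvMark_run rs _ (Q ++ [some r]) r Q.length 1 (by simp) (by simp; omega)]
        simp only [List.map_const']
        have hgetD : ((Q ++ [some r]) ++ List.replicate (rs.takeWhile (· == r)).length
            (none : Option String) ++ (rs.dropWhile (· == r)).map some).getD Q.length none
            = some r := by
          unfold List.getD
          rw [List.getElem?_append_left (by simp), List.getElem?_append_left (by simp),
            List.getElem?_append_right (Nat.le_refl _)]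
          simp
        have htr : pvTruthy (some r) = true := by
          simp [pvTruthy, hr]
        simp only [hgetD, htr, Bool.true_and, pvStrO]
        have hsum : (rs.takeWhile (· == r)).length + (rs.dropWhile (· == r)).length
            = rs.length := by
          have h := congrArg List.length (List.takeWhile_append_dropWhile (p := (· == r)) (l := rs))
          rw [List.length_append] at h
          exact h
        have hfu : fu = (rs.takeWhile (· == r)).length + (fu - (rs.takeWhile (· == r)).length) := by
          simp only [List.length_cons] at hfuel; omega
        rw [hfu]
        have hskip := pvOuter_skip (rs.takeWhile (· == r)).length
          (fu - (rs.takeWhile (· == r)).length) (Q ++ [some r])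
          ((rs.dropWhile (· == r)).map some)
        have hQ1 : (Q ++ [some r]).length = Q.length + 1 := by simp
        rw [hQ1] at hskip
        have hih := ih (rs.dropWhile (· == r)) ((Q ++ [some r]) ++
          List.replicate (rs.takeWhile (· == r)).length none)
        have h3 : ((Q ++ [some r]) ++ List.replicate (rs.takeWhile (· == r)).length none).length
            = Q.length + 1 + (rs.takeWhile (· == r)).length := by simp; omega
        rw [h3] at hih
        have hlen' : (rs.dropWhile (· == r)).length ≤ n := by
          simp only [List.length_cons] at hlen; omega
        have hfu' : (rs.dropWhile (· == r)).length ≤ fu - (rs.takeWhile (· == r)).length := by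
          simp only [List.length_cons] at hfuel; omega
        have hne' : ∀ b ∈ rs.dropWhile (· == r), b.toList ≠ [] := by
          intro b hb
          exact hne b (List.mem_cons_of_mem _ ((List.dropWhile_sublist _).mem hb))
        rw [pvRuns_cons, hskip _, hih _ _ hlen' hfu' hne']
        by_cases hk0 : (rs.takeWhile (· == r)).length = 0
        · simp [hk0, pvContrib, PySem.Str.len_eq]
          omega
        · have hc : (decide ((1 : Int) + ((rs.takeWhile (· == r)).length : Int) ≠ 1)) = true :=
            decide_eq_true (by omega)
          have hlt : (1 : Int) < 1 + ((rs.takeWhile (· == r)).length : Int) := by omega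
          rw [if_pos hc]
          simp [pvContrib, PySem.Str.len_eq, hlt]
          omega

-- B's fold, finished by the final flush, equals the run-length total
def pvFinish (r : Int × Option String × Int) : Int :=
  match r.2.1 with
  | none => r.1
  | some c => r.1 + pvContrib c r.2.2

theorem pvFoldB (xs : List String) :
    ∀ (a : String) (c total : Int),
    pvFinish (xs.foldl pvStep (total, some a, c))
      = total + pvContrib a (c + (xs.takeWhile (· == a)).length)
        + pvRuns (xs.dropWhile (· == a)) := by
  induction xs with
  | nil => intro a c total; simp [pvFinish, pvRuns_nil]
  | cons x xs ih =>
    intro a c total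
    rw [List.foldl_cons]
    by_cases hx : x = a
    · subst hx
      have hstep : pvStep (total, some x, c) x = (total, some x, c + 1) := by simp [pvStep]
      rw [hstep, ih x (c + 1) total]
      simp only [List.takeWhile_cons, List.dropWhile_cons, beq_self_eq_true, if_true,
        List.length_cons]
      have harg : c + 1 + ((xs.takeWhile (· == x)).length : Int)
          = c + (((xs.takeWhile (· == x)).length + 1 : Nat) : Int) := by push_cast; ring
      rw [harg]
    · have hstep : pvStep (total, some a, c) x = (total + pvContrib a c, some x, 1) := by
        unfold pvStep
        rw [if_neg (fun h => hx (Option.some.inj h).symm)]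
      rw [hstep, ih x 1 (total + pvContrib a c)]
      have hxb : (x == a) = false := by simp [hx]
      simp only [List.takeWhile_cons, List.dropWhile_cons, hxb, Bool.false_eq_true, if_false,
        List.length_nil, pvRuns_cons, Nat.cast_zero, add_zero]
      omega

theorem pvAlt (blocks : List String) :
    pvFinish (blocks.foldl pvStep (0, none, 0)) = pvRuns blocks := by
  match blocks with
  | [] => simp [pvFinish, pvRuns_nil]
  | b :: bs =>
    rw [List.foldl_cons]
    have hstep : pvStep (0, none, 0) b = (0, some b, 1) := by simp [pvStep]
    rw [hstep, pvFoldB bs b 1 0, pvRuns_cons]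
    omega

-- with a positive step, every block is a nonempty string
theorem pvBlocks_ne (s : String) (size : Int) (hs : 0 < size) :
    ∀ b ∈ (PySem.List.pyRange 0 (PySem.Str.len s) size).map
      (fun i => PySem.Str.slice s (some i) (some (i + size))), b.toList ≠ [] := by
  intro b hb
  simp only [List.mem_map] at hb
  obtain ⟨i, hi, rfl⟩ := hb
  rw [PySem.List.mem_pyRange_iff_of_pos hs] at hi
  obtain ⟨h0, h1, -⟩ := hi
  rw [PySem.Str.len_eq] at h1
  have hsl : (PySem.Str.slice s (some i) (some (i + size))).toList
      = PySem.List.slice s.toList (some i) (some (i + size)) := by simp [PySem.Str.slice]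
  rw [hsl, PySem.List.slice_toNat _ h0 (by omega)]
  intro hnil
  have hlen := congrArg List.length hnil
  simp only [List.length_take, List.length_drop, List.length_nil] at hlen
  omega

-- ===== VERDICT (by name: the statement is the Claim_ definition above) =====
theorem lenString_spec : Claim_equal_lenString := by
  intro brick s _ hpre
  unfold Pre_lenString at hpre
  unfold Spec_lenString lenString lenString_alt
  by_cases hb : 0 < brick + 1
  · have hne := pvBlocks_ne s (brick + 1) hb
    have hA := pvOuter_main
      (((PySem.List.pyRange 0 (PySem.Str.len s) (brick + 1)).map
        (fun i => PySem.Str.slice s (some i) (some (i + (brick + 1))))).length)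
      ((PySem.List.pyRange 0 (PySem.Str.len s) (brick + 1)).map
        (fun i => PySem.Str.slice s (some i) (some (i + (brick + 1)))))
      [] []
      (((PySem.List.pyRange 0 (PySem.Str.len s) (brick + 1)).map
        (fun i => PySem.Str.slice s (some i) (some (i + (brick + 1))))).map some).length
      (le_refl _) (by simp) hne
    simp only [List.nil_append, List.length_nil, Nat.cast_zero, zero_add, List.length_map] at hA
    simp only [List.length_map]
    rw [hA, ← pvAlt]
    rfl
  · have hr : PySem.List.pyRange 0 (PySem.Str.len s) (brick + 1) = [] := by
      have h0 : ¬ (brick + 1 = 0) := by omega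
      have h1 : ¬ (0 < brick + 1) := by omega
      simp [PySem.List.pyRange, h0, h1, PySem.Str.len_eq]
    simp only [hr, List.map_nil, List.foldl_nil, List.length_nil]
    simp [pvOuter]
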